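-- pv_equiv track=rewrite | github.com/biblePark/miplatform | scripts/run_real_sample_e2e_regression.py | _format_status_counts
-- ===== SOURCE A (Python) =====
-- from collections import Counter, defaultdict
--
-- def _format_status_counts(counter: Counter[str]) -> dict[str, int]:
--     keys = ["success", "failure", "skipped", "pending", "missing"]
--     payload: dict[str, int] = {}
--     for key in keys:
--         if counter.get(key, 0) > 0:
--             payload[key] = counter[key]
--     for key in sorted(counter):
--         if key in payload:
--             continue
--         payload[key] = counter[key]
--     return payload
-- ===== SOURCE B (Python) =====
-- def _format_status_counts(counter):
--     prio = {k: i for i, k in enumerate(["success", "failure", "skipped", "pending", "missing"])}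
--     def rank(key):
--         i = prio.get(key)
--         return (i, key) if i is not None and counter[key] > 0 else (5, key)
--     return {k: counter[k] for k in sorted(counter, key=rank)}
-- ===== Notes on version B (the rewrite author's own statement) =====
-- stated objective: simpler
-- what changed: Replaces A's two sequential building passes (fixed priority loop, then alphabetical fill-in of the remaining keys) by a single comparator-driven sort: every key gets a rank (its priority index when it is a priority name with a positive count, otherwise 5, tie-broken by the key itself) and the dict is rebuilt in one comprehension over the keys sorted by that rank.
import Mathlib
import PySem

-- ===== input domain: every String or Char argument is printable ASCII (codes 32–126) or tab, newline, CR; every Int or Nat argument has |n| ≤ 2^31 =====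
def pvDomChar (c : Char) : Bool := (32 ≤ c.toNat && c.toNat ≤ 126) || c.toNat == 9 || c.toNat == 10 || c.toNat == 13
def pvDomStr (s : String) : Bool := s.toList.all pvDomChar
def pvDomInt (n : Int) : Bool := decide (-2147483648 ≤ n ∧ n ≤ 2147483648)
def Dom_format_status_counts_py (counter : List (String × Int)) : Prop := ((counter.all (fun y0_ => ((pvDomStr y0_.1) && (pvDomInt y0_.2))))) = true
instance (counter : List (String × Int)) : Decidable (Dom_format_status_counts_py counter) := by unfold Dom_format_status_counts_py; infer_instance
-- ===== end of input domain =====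

-- B replaces A's two building passes by one comparator-driven sort of the keys; objective: simpler (same cost).

-- ===== PORT A =====
def format_status_counts_py (counter : List (String × Int)) : List (String × Int) :=
  let d := PySem.Dict.ofList counter
  let keys : List String := ["success", "failure", "skipped", "pending", "missing"]
  let payload : PySem.Dict String Int :=
    keys.foldl (fun p key => if d.getD key 0 > 0 then p.insert key (d.getD key 0) else p)
      PySem.Dict.empty
  let payload :=
    (PySem.List.sorted d.keys (fun k => k) false).foldl
      (fun p key => if p.contains key then p else p.insert key (d.getD key 0)) payload
  payload.items

-- ===== PORT B =====
-- helper: the first component of Source B's rank tuple (the second component is always the key itself)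
def pvRank (d : PySem.Dict String Int) (key : String) : Int :=
  let prio : PySem.Dict String Int :=
    PySem.Dict.ofList [("success", 0), ("failure", 1), ("skipped", 2), ("pending", 3), ("missing", 4)]
  match prio.get? key with
  | some i => if d.getD key 0 > 0 then i else 5
  | none => 5

def format_status_counts_py_alt (counter : List (String × Int)) : List (String × Int) :=
  let d := PySem.Dict.ofList counter
  (PySem.List.sorted2 d.keys (fun k => pvRank d k) (fun k => k) false).map
    (fun k => (k, d.getD k 0))

-- ===== PRECONDITION & SPEC =====
def Spec_format_status_counts_py (counter : List (String × Int)) (out : List (String × Int)) : Prop := out = format_status_counts_py_alt counter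
instance (counter : List (String × Int)) (out : List (String × Int)) : Decidable (Spec_format_status_counts_py counter out) := by unfold Spec_format_status_counts_py; infer_instance

-- ===== CLAIM (what is proved, stated in full; the proofs are below) =====
def Claim_equal_format_status_counts_py : Prop := ∀ (counter : List (String × Int)), Dom_format_status_counts_py counter → Spec_format_status_counts_py counter (format_status_counts_py counter)

-- ===== LEMMAS AND PROOFS =====

-- the five priority names; for a fixed dict d: the positive ones (= keys of A's first pass),
-- the sorted key list, and the canonical output key order both programs produce
def pvP : List String := ["success", "failure", "skipped", "pending", "missing"]
def pvPos (d : PySem.Dict String Int) (k : String) : Bool := decide (d.getD k 0 > 0)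
def pvPkeys (d : PySem.Dict String Int) : List String := pvP.filter (pvPos d)
def pvSortedK (d : PySem.Dict String Int) : List String := PySem.List.sorted d.keys (fun k => k) false
def pvYs (d : PySem.Dict String Int) : List String :=
  pvPkeys d ++ (pvSortedK d).filter (fun k => !decide (k ∈ pvPkeys d))
def pvIdx (k : String) : Int :=
  if k = "success" then 0 else if k = "failure" then 1 else if k = "skipped" then 2
  else if k = "pending" then 3 else if k = "missing" then 4 else 5

-- generic: a conditional-insert fold is an unconditional-insert fold over the filtered list
lemma foldl_ite_insert (l : List String) (d0 : PySem.Dict String Int)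
    (p : String → Prop) [DecidablePred p] (v : String → Int) :
    l.foldl (fun acc k => if p k then acc.insert k (v k) else acc) d0
      = (l.filter (fun k => decide (p k))).foldl (fun acc k => acc.insert k (v k)) d0 := by
  induction l generalizing d0 with
  | nil => rfl
  | cons x t ih =>
      by_cases h : p x <;> simp [List.filter_cons, h, ih]

-- generic: the skip-if-present fold over a nodup key list appends exactly the fresh keys
lemma foldl_skip_insert (l : List String) (d0 : PySem.Dict String Int)
    (v : String → Int) (hl : l.Nodup) :
    (l.foldl (fun acc k => if acc.contains k then acc else acc.insert k (v k)) d0).items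
      = d0.items ++ (l.filter (fun k => !d0.contains k)).map (fun k => (k, v k)) := by
  induction l generalizing d0 with
  | nil => simp
  | cons x t ih =>
      rcases List.nodup_cons.mp hl with ⟨hx, ht⟩
      by_cases h : d0.contains x = true
      · rw [List.foldl_cons, if_pos h, ih _ ht, List.filter_cons]
        simp [h]
      · have h' : d0.contains x = false := by simpa using h
        rw [List.foldl_cons, if_neg (by simp [h']), ih _ ht,
          PySem.Dict.items_insert_of_not_contains d0 (v x) h']
        have hfe : t.filter (fun k => !(d0.insert x (v x)).contains k)
            = t.filter (fun k => !d0.contains k) := by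
          apply List.filter_congr
          intro k hk
          have hne : k ≠ x := fun e => hx (e ▸ hk)
          simp [PySem.Dict.contains_insert, hne]
        rw [hfe, List.filter_cons]
        simp [h']

lemma prio_get (k : String) :
    (PySem.Dict.ofList [("success",(0:Int)),("failure",1),("skipped",2),("pending",3),("missing",4)]).get? k
      = if "success" = k then some 0 else if "failure" = k then some 1 else
        if "skipped" = k then some 2 else if "pending" = k then some 3 else
        if "missing" = k then some 4 else none := by
  have h : (PySem.Dict.ofList [("success",(0:Int)),("failure",1),("skipped",2),("pending",3),("missing",4)])
      = PySem.Dict.mk [("success",0),("failure",1),("skipped",2),("pending",3),("missing",4)] := by decide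
  rw [h]
  simp only [PySem.Dict.get?_mk_cons, beq_iff_eq]
  rfl

lemma pvRank_of_mem_Pkeys (d : PySem.Dict String Int) (k : String) (h : k ∈ pvPkeys d) :
    pvRank d k = pvIdx k := by
  rcases List.mem_filter.mp h with ⟨hm, hp⟩
  have hpos : d.getD k 0 > 0 := by simpa [pvPos] using hp
  rcases (by simpa [pvP] using hm : k = "success" ∨ k = "failure" ∨ k = "skipped" ∨ k = "pending" ∨ k = "missing")
    with rfl | rfl | rfl | rfl | rfl <;>
    simp [pvRank, prio_get, pvIdx, hpos]

lemma pvRank_lt_five_of_mem_Pkeys (d : PySem.Dict String Int) (k : String) (h : k ∈ pvPkeys d) :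
    pvRank d k < 5 := by
  rw [pvRank_of_mem_Pkeys d k h]
  rcases List.mem_filter.mp h with ⟨hm, _⟩
  rcases (by simpa [pvP] using hm : k = "success" ∨ k = "failure" ∨ k = "skipped" ∨ k = "pending" ∨ k = "missing")
    with rfl | rfl | rfl | rfl | rfl <;> simp [pvIdx]

lemma pvRank_of_not_mem_Pkeys (d : PySem.Dict String Int) (k : String) (h : k ∉ pvPkeys d) :
    pvRank d k = 5 := by
  by_cases hm : k ∈ pvP
  · have hnp : ¬ d.getD k 0 > 0 := by
      intro hpos
      exact h (List.mem_filter.mpr ⟨hm, by simpa [pvPos] using hpos⟩)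
    rcases (by simpa [pvP] using hm : k = "success" ∨ k = "failure" ∨ k = "skipped" ∨ k = "pending" ∨ k = "missing")
      with rfl | rfl | rfl | rfl | rfl <;> simp [pvRank, prio_get, hnp]
  · have h1 : k ≠ "success" := fun e => hm (by simp [pvP, e])
    have h2 : k ≠ "failure" := fun e => hm (by simp [pvP, e])
    have h3 : k ≠ "skipped" := fun e => hm (by simp [pvP, e])
    have h4 : k ≠ "pending" := fun e => hm (by simp [pvP, e])
    have h5 : k ≠ "missing" := fun e => hm (by simp [pvP, e])
    simp [pvRank, prio_get, Ne.symm h1, Ne.symm h2, Ne.symm h3, Ne.symm h4, Ne.symm h5]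

lemma pvPkeys_subset_keys (d : PySem.Dict String Int) : ∀ k ∈ pvPkeys d, k ∈ d.keys := by
  intro k hk
  rcases List.mem_filter.mp hk with ⟨_, hp⟩
  have hpos : d.getD k 0 > 0 := by simpa [pvPos] using hp
  by_contra hnm
  have : d.get? k = none := (PySem.Dict.get?_eq_none_iff_not_mem_keys d k).mpr hnm
  simp [PySem.Dict.getD, this] at hpos

lemma pvPkeys_nodup (d : PySem.Dict String Int) : (pvPkeys d).Nodup :=
  List.Nodup.filter _ (by decide : pvP.Nodup)

lemma pvYs_perm (d : PySem.Dict String Int) (hnd : d.keys.Nodup) : (pvYs d).Perm d.keys := by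
  have hs : (pvSortedK d).Perm d.keys := PySem.List.sorted_perm d.keys (fun k => k) false
  have hsn : (pvSortedK d).Nodup := hs.symm.nodup hnd
  have hp1 : (pvPkeys d).Perm ((pvSortedK d).filter (fun k => decide (k ∈ pvPkeys d))) := by
    rw [List.perm_ext_iff_of_nodup (pvPkeys_nodup d) (hsn.filter _)]
    intro a
    simp only [List.mem_filter, decide_eq_true_eq]
    exact ⟨fun ha => ⟨hs.mem_iff.mpr (pvPkeys_subset_keys d a ha), ha⟩, fun ha => ha.2⟩
  exact ((hp1.append_right _).trans
    (List.filter_append_perm (fun k => decide (k ∈ pvPkeys d)) (pvSortedK d))).trans hs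

lemma pvYs_pairwise (d : PySem.Dict String Int) (hnd : d.keys.Nodup) :
    (pvYs d).Pairwise (fun a b => toLex (pvRank d a, a) < toLex (pvRank d b, b)) := by
  have hs : (pvSortedK d).Perm d.keys := PySem.List.sorted_perm d.keys (fun k => k) false
  have hsn : (pvSortedK d).Nodup := hs.symm.nodup hnd
  have hstrict : (pvSortedK d).Pairwise (fun a b : String => a < b) := by
    have hle : (pvSortedK d).Pairwise (fun a b : String => a ≤ b) :=
      PySem.List.sorted_pairwise d.keys (fun k => k)
    exact (hle.and hsn).imp (fun h => lt_of_le_of_ne h.1 h.2)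
  rw [pvYs, List.pairwise_append]
  refine ⟨?_, ?_, ?_⟩
  · -- within the priority block: ranks strictly increase along pvP
    have hidx : pvP.Pairwise (fun a b => pvIdx a < pvIdx b) := by decide
    refine List.pairwise_filter.mpr (hidx.imp_of_mem ?_)
    intro a b ha hb hab hpa hpb
    have ha' : a ∈ pvPkeys d := List.mem_filter.mpr ⟨ha, hpa⟩
    have hb' : b ∈ pvPkeys d := List.mem_filter.mpr ⟨hb, hpb⟩
    rw [Prod.Lex.toLex_lt_toLex]
    exact Or.inl (by rw [pvRank_of_mem_Pkeys d a ha', pvRank_of_mem_Pkeys d b hb']; exact hab)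
  · -- within the alphabetical block: both ranks are 5, keys strictly increase
    refine List.pairwise_filter.mpr (hstrict.imp_of_mem ?_)
    intro a b _ _ hab hpa hpb
    have ha : a ∉ pvPkeys d := by simpa using hpa
    have hb : b ∉ pvPkeys d := by simpa using hpb
    rw [Prod.Lex.toLex_lt_toLex]
    exact Or.inr ⟨by rw [pvRank_of_not_mem_Pkeys d a ha, pvRank_of_not_mem_Pkeys d b hb], hab⟩
  · -- across the blocks: priority rank < 5 = alphabetical rank
    intro a ha b hb
    have hb' : b ∉ pvPkeys d := by
      rcases List.mem_filter.mp hb with ⟨_, h⟩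
      simpa using h
    rw [Prod.Lex.toLex_lt_toLex]
    exact Or.inl (by rw [pvRank_of_not_mem_Pkeys d b hb']; exact pvRank_lt_five_of_mem_Pkeys d a ha)

lemma sorted2_eq_sorted_lex (xs : List String) (r : String → Int) :
    PySem.List.sorted2 xs r (fun k => k) false
      = PySem.List.sorted xs (fun k => toLex (r k, k)) false := by
  unfold PySem.List.sorted2 PySem.List.sorted
  simp only [if_neg (by decide : ¬ (false = true))]
  congr 1
  funext acc x
  congr 1
  funext a b
  rcases lt_trichotomy (r a) (r b) with h | h | h
  · have h2 : ¬ r b < r a := not_lt.mpr h.le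
    simp [Prod.Lex.toLex_lt_toLex, h, h2]
  · have h1 : ¬ r a < r b := by omega
    have h2 : ¬ r b < r a := by omega
    simp [Prod.Lex.toLex_lt_toLex, h1, h2, h]
  · have h1 : ¬ r a < r b := not_lt.mpr h.le
    simp [Prod.Lex.toLex_lt_toLex, h1, h]
    intro he
    omega

-- A's result, as the canonical key list mapped to values
lemma portA_eq (counter : List (String × Int)) :
    format_status_counts_py counter
      = (pvYs (PySem.Dict.ofList counter)).map
          (fun k => (k, (PySem.Dict.ofList counter).getD k 0)) := by
  have hnd : (PySem.Dict.ofList counter).keys.Nodup := PySem.Dict.nodup_keys_ofList counter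
  set d := PySem.Dict.ofList counter with hd
  show ((pvSortedK d).foldl
      (fun p key => if p.contains key then p else p.insert key (d.getD key 0))
      (pvP.foldl (fun p key => if d.getD key 0 > 0 then p.insert key (d.getD key 0) else p)
        PySem.Dict.empty)).items = _
  rw [foldl_ite_insert pvP PySem.Dict.empty (fun k => d.getD k 0 > 0) (fun k => d.getD k 0)]
  have hpk : (pvP.filter (fun k => decide (d.getD k 0 > 0))) = pvPkeys d := rfl
  rw [hpk]
  set payload1 := (pvPkeys d).foldl (fun acc k => acc.insert k (d.getD k 0)) PySem.Dict.empty with hp1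
  have hitems1 : payload1.items = (pvPkeys d).map (fun k => (k, d.getD k 0)) := by
    have := PySem.Dict.items_foldl_insert_fresh (pvPkeys d) (fun k => k) (fun k => d.getD k 0)
      PySem.Dict.empty (fun a _ => PySem.Dict.contains_empty a)
      (by simpa using pvPkeys_nodup d)
    simpa [PySem.Dict.empty] using this
  have hsn : (pvSortedK d).Nodup :=
    (PySem.List.sorted_perm d.keys (fun k => k) false).symm.nodup hnd
  rw [foldl_skip_insert (pvSortedK d) payload1 (fun k => d.getD k 0) hsn, hitems1]
  have hcont : ∀ k, payload1.contains k = decide (k ∈ pvPkeys d) := by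
    intro k
    rw [PySem.Dict.contains_eq_decide_mem_keys]
    have hk : payload1.keys = pvPkeys d := by
      show payload1.items.map (fun x => x.1) = pvPkeys d
      rw [hitems1, List.map_map]
      simp [Function.comp_def]
    rw [hk]
  have hfe : (pvSortedK d).filter (fun k => !payload1.contains k)
      = (pvSortedK d).filter (fun k => !decide (k ∈ pvPkeys d)) := by
    apply List.filter_congr
    intro k _
    rw [hcont]
  rw [hfe, pvYs, List.map_append]

lemma portB_eq (counter : List (String × Int)) :
    format_status_counts_py_alt counter
      = (pvYs (PySem.Dict.ofList counter)).map
          (fun k => (k, (PySem.Dict.ofList counter).getD k 0)) := by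
  have hnd : (PySem.Dict.ofList counter).keys.Nodup := PySem.Dict.nodup_keys_ofList counter
  set d := PySem.Dict.ofList counter with hd
  show (PySem.List.sorted2 d.keys (fun k => pvRank d k) (fun k => k) false).map
      (fun k => (k, d.getD k 0)) = _
  rw [sorted2_eq_sorted_lex d.keys (fun k => pvRank d k),
    PySem.List.sorted_eq_of_perm_of_pairwise_lt d.keys (pvYs d)
      (fun k => toLex (pvRank d k, k)) (pvYs_perm d hnd) (pvYs_pairwise d hnd)]

-- ===== VERDICT (by name: the statement is the Claim_ definition above) =====
theorem format_status_counts_py_spec : Claim_equal_format_status_counts_py := by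
  intro counter _
  unfold Spec_format_status_counts_py
  rw [portA_eq, portB_eq]
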